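-- pv_equiv track=rewrite | github.com/vladimir-sashin/barcodes-ocr | src/train/train_utils/predict_utils.py | labels_to_strings
-- ===== SOURCE A (Python) =====
-- RESULT_LABELS_TYPE = list[list[int]]
--
-- def labels_to_strings(labels: RESULT_LABELS_TYPE, vocab: str) -> list[str]:
--     strings = []
--     for single_str_labels in labels:
--         try:
--             output_str = _get_output_str(single_str_labels, vocab)
--         except IndexError:
--             strings.append('Error')
--         else:
--             strings.append(output_str)
--     return strings
--
-- def _get_output_str(single_str_labels: list[int], vocab: str) -> str:
--     return ''.join(vocab[char_index - 1] if char_index > 0 else '_' for char_index in single_str_labels)  # noqa: WPS221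
-- ===== SOURCE B (Python) =====
-- def labels_to_strings(labels, vocab):
--     n = len(vocab)
--     return [
--         'Error' if any(c > n for c in single_str_labels)
--         else ''.join(vocab[c - 1] if c > 0 else '_' for c in single_str_labels)
--         for single_str_labels in labels
--     ]
-- ===== Notes on version B (the rewrite author's own statement) =====
-- stated objective: simpler
-- what changed: Replaces the exception-driven control flow (helper whose join raises IndexError mid-way, caught by try/except) with a single comprehension that first validates each label list with an explicit range check (any c > len(vocab)) and only then decodes it.
import Mathlib
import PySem

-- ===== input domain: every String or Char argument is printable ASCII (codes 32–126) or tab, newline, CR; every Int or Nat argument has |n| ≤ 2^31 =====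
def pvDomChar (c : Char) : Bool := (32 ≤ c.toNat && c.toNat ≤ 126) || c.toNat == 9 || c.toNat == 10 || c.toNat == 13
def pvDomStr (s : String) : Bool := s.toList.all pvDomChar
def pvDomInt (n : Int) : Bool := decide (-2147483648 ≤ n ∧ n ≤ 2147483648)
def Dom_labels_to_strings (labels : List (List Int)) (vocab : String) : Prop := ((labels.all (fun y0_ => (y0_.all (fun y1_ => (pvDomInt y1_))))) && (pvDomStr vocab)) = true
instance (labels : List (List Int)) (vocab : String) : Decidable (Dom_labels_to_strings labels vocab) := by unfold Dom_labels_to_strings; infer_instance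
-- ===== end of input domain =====

-- B replaces A's exception-driven control flow (helper whose join raises IndexError, caught by try/except)
-- by an explicit validate-then-decode comprehension; the return values are proved equal.

-- ===== PORT A =====
-- _get_output_str: the generator feeding ''.join, where an out-of-range vocab[c-1] raises
-- IndexError; modelled with Option (none = IndexError), pyGet? = vocab[c-1]
def pvGetOutputStr? : List Int → List Char → Option (List Char)
  | [], _ => some []
  | c :: rest, vs =>
    match (if c > 0 then PySem.List.pyGet? vs (c - 1) else some '_') with
    | none => none
    | some x =>
      match pvGetOutputStr? rest vs with
      | none => none
      | some xs => some (x :: xs)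

def labels_to_strings (labels : List (List Int)) (vocab : String) : List String :=
  labels.foldl (fun strings single_str_labels =>
    match pvGetOutputStr? single_str_labels vocab.toList with
    | none => strings ++ ["Error"]          -- except IndexError
    | some cs => strings ++ [String.ofList cs]) []

-- ===== PORT B =====
def labels_to_strings_alt (labels : List (List Int)) (vocab : String) : List String :=
  labels.map (fun single_str_labels =>
    if single_str_labels.any (fun c => c > (vocab.toList.length : Int)) then "Error"
    else String.ofList (single_str_labels.map (fun c =>
      if c > 0 then (PySem.List.pyGet? vocab.toList (c - 1)).getD '_' else '_')))

-- ===== PRECONDITION & SPEC =====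
def Spec_labels_to_strings (labels : List (List Int)) (vocab : String) (out : List String) : Prop := out = labels_to_strings_alt labels vocab
instance (labels : List (List Int)) (vocab : String) (out : List String) : Decidable (Spec_labels_to_strings labels vocab out) := by unfold Spec_labels_to_strings; infer_instance

-- ===== CLAIM (what is proved, stated in full; the proofs are below) =====
def Claim_equal_labels_to_strings : Prop := ∀ (labels : List (List Int)) (vocab : String), Dom_labels_to_strings labels vocab → Spec_labels_to_strings labels vocab (labels_to_strings labels vocab)

-- ===== LEMMAS AND PROOFS =====

lemma pvGetOutputStr?_eq_none_iff (l : List Int) (vs : List Char) :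
    pvGetOutputStr? l vs = none ↔ l.any (fun c => c > (vs.length : Int)) = true := by
  induction l with
  | nil => simp [pvGetOutputStr?]
  | cons c rest ih =>
    by_cases hc : c > 0
    · rcases h : PySem.List.pyGet? vs (c - 1) with _ | x
      · have hgt : c > (vs.length : Int) := by
          have h2 : ¬ PySem.Raise.InRange vs.length (c - 1) := by
            rw [← PySem.List.pyGet?_eq_none_iff]; exact h
          unfold PySem.Raise.InRange at h2; omega
        simp [pvGetOutputStr?, hc, h, hgt]
      · have hle : ¬ c > (vs.length : Int) := by
          by_contra hgt
          have hnone : PySem.List.pyGet? vs (c - 1) = none := by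
            rw [PySem.List.pyGet?_eq_none_iff]
            unfold PySem.Raise.InRange; omega
          simp [h] at hnone
        rcases hrest : pvGetOutputStr? rest vs with _ | xs
        · have := ih.mp hrest
          simp [pvGetOutputStr?, hc, h, hrest, this, hle]
        · have hany : rest.any (fun c => c > (vs.length : Int)) = false := by
            rw [← Bool.not_eq_true, ← ih]; simp [hrest]
          simp [pvGetOutputStr?, hc, h, hrest, hany, hle]
    · have hle : ¬ c > (vs.length : Int) := by
        have : (0 : Int) ≤ vs.length := by positivity
        omega
      rcases hrest : pvGetOutputStr? rest vs with _ | xs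
      · have := ih.mp hrest
        simp [pvGetOutputStr?, hc, hrest, this, hle]
      · have hany : rest.any (fun c => c > (vs.length : Int)) = false := by
          rw [← Bool.not_eq_true, ← ih]; simp [hrest]
        simp [pvGetOutputStr?, hc, hrest, hany, hle]

lemma pvGetOutputStr?_eq_some (l : List Int) (vs : List Char) (cs : List Char)
    (h : pvGetOutputStr? l vs = some cs) :
    cs = l.map (fun c => if c > 0 then (PySem.List.pyGet? vs (c - 1)).getD '_' else '_') := by
  induction l generalizing cs with
  | nil => simp [pvGetOutputStr?] at h; simp [← h]
  | cons c rest ih =>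
    rcases hx : (if c > 0 then PySem.List.pyGet? vs (c - 1) else some '_') with _ | x
    · simp [pvGetOutputStr?, hx] at h
    · rcases hrest : pvGetOutputStr? rest vs with _ | xs
      · simp [pvGetOutputStr?, hx, hrest] at h
      · simp only [pvGetOutputStr?, hx, hrest, Option.some.injEq] at h
        subst h
        have hxs := ih xs hrest
        by_cases hc : c > 0
        · simp only [if_pos hc] at hx
          simp [hc, hx, ← hxs]
        · simp only [if_neg hc, Option.some.injEq] at hx
          simp [hc, ← hx, ← hxs]

lemma pv_foldl_eq (labels : List (List Int)) (vocab : String) (acc : List String) :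
    labels.foldl (fun strings single_str_labels =>
      match pvGetOutputStr? single_str_labels vocab.toList with
      | none => strings ++ ["Error"]
      | some cs => strings ++ [String.ofList cs]) acc
    = acc ++ labels_to_strings_alt labels vocab := by
  induction labels generalizing acc with
  | nil => simp [labels_to_strings_alt]
  | cons l rest ih =>
    simp only [List.foldl_cons, labels_to_strings_alt, List.map_cons]
    rcases h : pvGetOutputStr? l vocab.toList with _ | cs
    · have hany := (pvGetOutputStr?_eq_none_iff l vocab.toList).mp h
      rw [ih]
      simp only [labels_to_strings_alt, hany, if_true, List.append_assoc]
      rfl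
    · have hany : l.any (fun c => c > (vocab.toList.length : Int)) = false := by
        rw [← Bool.not_eq_true, ← pvGetOutputStr?_eq_none_iff]; simp [h]
      rw [ih]
      simp only [labels_to_strings_alt, hany, Bool.false_eq_true, if_false, List.append_assoc]
      rw [pvGetOutputStr?_eq_some l vocab.toList cs h]
      rfl

-- ===== VERDICT (by name: the statement is the Claim_ definition above) =====
theorem labels_to_strings_spec : Claim_equal_labels_to_strings := by
  intro labels vocab _
  unfold Spec_labels_to_strings labels_to_strings
  simpa using pv_foldl_eq labels vocab []
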